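-- pv_equiv track=rewrite | github.com/ngboonchiang/telco_chatbot | conversation_flow_protocol_structure.py | get_previous_distinct_step
-- ===== SOURCE A (Python) =====
-- def get_previous_distinct_step(step_tracking):
--     if len(step_tracking) < 2:
--         return None  # Not enough history to compare
--
--     current = step_tracking[-1]
--
--     # Iterate backwards through the list (excluding the current step itself)
--     for prev_step in reversed(step_tracking[:-1]):
--         if prev_step != current:
--             return prev_step
--
--     return None  # All previous steps are the same as current
-- ===== SOURCE B (Python) =====
-- def get_previous_distinct_step(step_tracking):
--     if len(step_tracking) < 2:
--         return None
--     current = step_tracking[-1]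
--     # Stage 1: collect all earlier steps that differ from the current one.
--     distinct = [s for s in step_tracking[:-1] if s != current]
--     # Stage 2: the answer is the most recent such step, if any.
--     return distinct[-1] if distinct else None
-- ===== Notes on version B (the rewrite author's own statement) =====
-- stated objective: alternative
-- what changed: Replaces A's backward scan with early return by two staged passes: first build the list of earlier steps differing from the current one, then return its last element (or None if empty).
import Mathlib
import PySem

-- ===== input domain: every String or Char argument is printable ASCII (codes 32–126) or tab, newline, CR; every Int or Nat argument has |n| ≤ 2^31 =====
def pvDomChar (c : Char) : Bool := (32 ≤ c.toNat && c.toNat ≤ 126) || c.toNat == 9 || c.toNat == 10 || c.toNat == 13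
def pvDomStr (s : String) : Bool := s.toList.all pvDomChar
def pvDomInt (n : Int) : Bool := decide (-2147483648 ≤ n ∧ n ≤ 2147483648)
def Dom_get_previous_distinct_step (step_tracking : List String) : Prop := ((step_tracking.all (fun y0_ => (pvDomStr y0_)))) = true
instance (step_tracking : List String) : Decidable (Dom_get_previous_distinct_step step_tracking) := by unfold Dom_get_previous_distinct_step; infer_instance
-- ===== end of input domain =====

-- B replaces A's backward scan with early return by two staged passes: filter the differing earlier steps, then take the last one (objective: alternative).

-- ===== PORT A =====
-- the backward for-loop: scan reversed(step_tracking[:-1]) left to right, return first element ≠ current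
def gpdA_scan (current : String) : List String → Option String
  | [] => none
  | x :: xs => if x ≠ current then some x else gpdA_scan current xs

def get_previous_distinct_step (step_tracking : List String) : Option String :=
  if step_tracking.length < 2 then none
  else
    match PySem.List.pyGet? step_tracking (-1) with
    | none => none
    | some current => gpdA_scan current step_tracking.dropLast.reverse

-- ===== PORT B =====
-- stage 1 is the list comprehension (List.filter); stage 2 is 'distinct[-1] if distinct else None' (getLast?)
def get_previous_distinct_step_alt (step_tracking : List String) : Option String :=
  if step_tracking.length < 2 then none
  else
    match PySem.List.pyGet? step_tracking (-1) with
    | none => none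
    | some current =>
        let distinct := step_tracking.dropLast.filter (fun s => s ≠ current)
        distinct.getLast?

-- ===== PRECONDITION & SPEC =====
def Spec_get_previous_distinct_step (step_tracking : List String) (out : Option String) : Prop := out = get_previous_distinct_step_alt step_tracking
instance (step_tracking : List String) (out : Option String) : Decidable (Spec_get_previous_distinct_step step_tracking out) := by unfold Spec_get_previous_distinct_step; infer_instance

-- ===== CLAIM =====
def Claim_equal_get_previous_distinct_step : Prop := ∀ (step_tracking : List String), Dom_get_previous_distinct_step step_tracking → Spec_get_previous_distinct_step step_tracking (get_previous_distinct_step step_tracking)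

-- ===== LEMMAS AND PROOFS =====

-- A's scan returns the head of the filtered list
theorem gpdA_scan_eq_filter_head (current : String) (ys : List String) :
    gpdA_scan current ys = (ys.filter (fun s => s ≠ current)).head? := by
  induction ys with
  | nil => rfl
  | cons y ys ih =>
    by_cases h : y = current <;> simp [gpdA_scan, List.filter, h, ih]

-- ===== VERDICT =====
theorem get_previous_distinct_step_spec : Claim_equal_get_previous_distinct_step := by
  intro l _
  unfold Spec_get_previous_distinct_step get_previous_distinct_step get_previous_distinct_step_alt
  by_cases h : l.length < 2
  · simp [h]
  · simp only [h, if_false]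
    cases PySem.List.pyGet? l (-1) with
    | none => rfl
    | some c =>
      simp only
      rw [gpdA_scan_eq_filter_head, List.filter_reverse, List.head?_reverse]
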